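-- pv_equiv track=rewrite | github.com/Luvishable/LEETCODE-SOLUTIONS | divide_array_into_equal_parts.py | divide_into_equal_parts
-- ===== SOURCE A (Python) =====
-- def divide_into_equal_parts(array):
--
--     my_dict = {}
--
--     for i in range(len(array)):
--         if array[i] not in my_dict:
--             my_dict[array[i]] = 1
--         else:
--             my_dict[array[i]] += 1
--
--     for key, value in my_dict.items():
--         if value % 2 != 0:
--             return False
--     return True
-- ===== SOURCE B (Python) =====
-- def divide_into_equal_parts(array):
--     seen = set()
--     for x in array:
--         if x in seen:
--             seen.discard(x)
--         else:
--             seen.add(x)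
--     return len(seen) == 0
-- ===== Notes on version B (the rewrite author's own statement) =====
-- stated objective: idiomatic
-- what changed: Replaces the count-dict build plus a second parity scan over its items with a single pass that toggles set membership per element and tests emptiness at the end.
import Mathlib
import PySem

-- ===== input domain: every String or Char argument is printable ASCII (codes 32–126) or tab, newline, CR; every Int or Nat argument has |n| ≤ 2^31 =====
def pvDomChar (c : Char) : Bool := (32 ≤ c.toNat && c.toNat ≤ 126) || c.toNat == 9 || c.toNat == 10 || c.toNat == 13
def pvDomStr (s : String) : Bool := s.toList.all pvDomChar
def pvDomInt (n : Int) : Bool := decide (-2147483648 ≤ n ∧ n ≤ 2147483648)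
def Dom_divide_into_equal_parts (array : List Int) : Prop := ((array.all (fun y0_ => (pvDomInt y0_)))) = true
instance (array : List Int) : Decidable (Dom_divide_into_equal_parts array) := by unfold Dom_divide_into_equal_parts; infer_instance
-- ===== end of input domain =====

-- B replaces the count-dict plus parity scan with one membership-toggling pass (idiomatic, same cost).

-- ===== PORT A =====
def divide_into_equal_parts (array : List Int) : Bool :=
  -- for i in range(len(array)): build my_dict counting occurrences
  let my_dict : PySem.Dict Int Int :=
    (PySem.List.pyRange 0 (PySem.List.len array) 1).foldl
      (fun d i =>
        let x := PySem.List.pyGetD array i 0   -- i always in range, so the default is never used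
        if d.contains x = false then d.insert x 1
        else d.insert x (d.getD x 0 + 1))
      PySem.Dict.empty
  -- for key, value in my_dict.items(): if value % 2 != 0: return False / return True
  my_dict.items.all (fun kv => PySem.Int.mod kv.2 2 == 0)

-- ===== PORT B =====
def divide_into_equal_parts_alt (array : List Int) : Bool :=
  let seen : PySem.Set Int :=
    array.foldl
      (fun s x => if PySem.Set.contains s x then PySem.Set.discard s x else PySem.Set.add s x)
      PySem.Set.empty
  PySem.Set.len seen == 0

-- ===== PRECONDITION & SPEC =====
def Spec_divide_into_equal_parts (array : List Int) (out : Bool) : Prop := out = divide_into_equal_parts_alt array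
instance (array : List Int) (out : Bool) : Decidable (Spec_divide_into_equal_parts array out) := by unfold Spec_divide_into_equal_parts; infer_instance

-- ===== CLAIM (what is proved, stated in full; the proofs are below) =====
def Claim_equal_divide_into_equal_parts : Prop := ∀ (array : List Int), Dom_divide_into_equal_parts array → Spec_divide_into_equal_parts array (divide_into_equal_parts array)

-- ===== LEMMAS AND PROOFS =====

-- B's toggle loop: membership after the loop is membership-before XOR odd count.
theorem toggle_mem (l : List Int) (s : PySem.Set Int) (v : Int) :
    (v ∈ l.foldl
        (fun s x => if PySem.Set.contains s x then PySem.Set.discard s x else PySem.Set.add s x) s)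
      ↔ ((v ∈ s) ↔ l.count v % 2 = 0) := by
  induction l generalizing s with
  | nil => simp
  | cons x t ih =>
    simp only [List.foldl_cons]
    by_cases hx : x ∈ s
    · rw [if_pos (by simpa [PySem.Set.contains_iff] using hx), ih,
        PySem.Set.mem_discard]
      by_cases hv : v = x
      · subst hv
        simp only [hx, true_iff, List.count_cons_self]
        constructor
        · intro h; omega
        · intro h; constructor
          · intro hmem; omega
          · intro he; exact absurd he (by omega)
      · simp [Ne.symm hv]
        tauto
    · rw [if_neg (by simpa [PySem.Set.contains_iff] using hx), ih,
        PySem.Set.mem_add]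
      by_cases hv : v = x
      · subst hv
        simp only [hx, or_true, true_iff, List.count_cons_self, false_iff]
        constructor
        · intro h; omega
        · intro h; omega
      · simp [Ne.symm hv]
        tauto

-- A's index loop builds exactly Counter(array).
theorem a_dict_eq_counter (array : List Int) :
    (PySem.List.pyRange 0 (PySem.List.len array) 1).foldl
      (fun d i =>
        let x := PySem.List.pyGetD array i 0
        if d.contains x = false then d.insert x 1
        else d.insert x (d.getD x 0 + 1))
      (PySem.Dict.empty : PySem.Dict Int Int)
      = PySem.Dict.counter array := by
  calc
    (PySem.List.pyRange 0 (PySem.List.len array) 1).foldl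
      (fun d i =>
        let x := PySem.List.pyGetD array i 0
        if d.contains x = false then d.insert x 1
        else d.insert x (d.getD x 0 + 1))
      (PySem.Dict.empty : PySem.Dict Int Int)
      = ((PySem.List.pyRange 0 (PySem.List.len array) 1).map (fun i => PySem.List.pyGetD array i 0)).foldl
          (fun d x => if d.contains x = false then d.insert x 1
            else d.insert x (d.getD x 0 + 1))
          (PySem.Dict.empty : PySem.Dict Int Int) :=
        (List.foldl_map (f := fun i => PySem.List.pyGetD array i 0)
          (g := fun d x => if d.contains x = false then d.insert x 1
            else d.insert x (d.getD x 0 + 1))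
          (l := PySem.List.pyRange 0 (PySem.List.len array) 1)
          (init := (PySem.Dict.empty : PySem.Dict Int Int))).symm
    _ = array.foldl
          (fun d x => if d.contains x = false then d.insert x 1
            else d.insert x (d.getD x 0 + 1))
          (PySem.Dict.empty : PySem.Dict Int Int) := by rw [PySem.List.map_pyGetD_pyRange_zero]
    _ = PySem.Dict.counter array := ?_
  rw [show (fun (d : PySem.Dict Int Int) (x : Int) =>
        if d.contains x = false then d.insert x 1 else d.insert x (d.getD x 0 + 1))
      = (fun d x => d.insert x (d.getD x 0 + 1)) by
    funext d x
    by_cases hc : d.contains x = true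
    · simp [hc]
    · have h0 : d.getD x 0 = 0 :=
        PySem.Dict.getD_of_not_contains d 0 (by simpa using hc)
      simp [hc, h0]]
  exact PySem.Dict.foldl_insert_getD_add_one_eq_counter array

theorem a_iff (array : List Int) :
    divide_into_equal_parts array = true ↔ ∀ v : Int, array.count v % 2 = 0 := by
  have h : divide_into_equal_parts array
      = (PySem.Dict.counter array).items.all (fun kv => PySem.Int.mod kv.2 2 == 0) := by
    unfold divide_into_equal_parts
    rw [a_dict_eq_counter]
  rw [h, PySem.Dict.items_counter]
  simp only [List.all_map, List.all_eq_true, Function.comp,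
    PySem.Set.mem_ofList, beq_iff_eq]
  constructor
  · intro h v
    by_cases hv : v ∈ array
    · have := h v hv
      rw [PySem.Int.mod_eq_zero_iff_dvd] at this
      have : (2:Nat) ∣ array.count v := by exact_mod_cast this
      omega
    · simp [List.count_eq_zero_of_not_mem hv]
  · intro h v _
    rw [PySem.Int.mod_eq_zero_iff_dvd]
    exact_mod_cast (Nat.dvd_of_mod_eq_zero (h v) : (2:Nat) ∣ array.count v)

theorem b_iff (array : List Int) :
    divide_into_equal_parts_alt array = true ↔ ∀ v : Int, array.count v % 2 = 0 := by
  unfold divide_into_equal_parts_alt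
  simp only [PySem.Set.len, beq_iff_eq, Int.natCast_eq_zero,
    List.length_eq_zero_iff, List.eq_nil_iff_forall_not_mem]
  constructor
  · intro h v
    have := h v
    rw [toggle_mem] at this
    simpa using this
  · intro h v
    rw [toggle_mem]
    simp [h v]

-- ===== VERDICT (by name: the statement is the Claim_ definition above) =====
theorem divide_into_equal_parts_spec : Claim_equal_divide_into_equal_parts := by
  intro array _
  unfold Spec_divide_into_equal_parts
  rw [Bool.eq_iff_iff, a_iff, b_iff]
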